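-- pv_equiv track=rewrite | github.com/wonn23/algorithm-study | 0704/0704_sng.py | solution
-- ===== SOURCE A (Python) =====
-- def solution(n, times):
--     answer = 0
--     left = 1
--     right = max(times) * n
--     while left <= right:
--         mid = (left+ right) // 2
--         people = 0
--         for time in times:
--             people = people + (mid // time)
--
--         if people >= n:
--             answer = mid
--             right = mid - 1
--         elif people < n:
--             left = mid + 1
--
--     return answer
-- ===== SOURCE B (Python) =====
-- def solution(n, times):
--     # No binary search: using the common multiple L of the service times, the number of
--     # people served by time t is bracketed by t*S/L - k < served(t) <= t*S/L (S = sum of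
--     # L//x), so the answer lies in the narrow window (lo, hi] around the harmonic
--     # estimate n*L/S; enumerate the few completion events there, sort, and pick the
--     # (n - served(lo))-th one.
--     if n <= 0:
--         return 0
--
--     def gcd(a, b):
--         while b:
--             a, b = b, a % b
--         return a
--
--     L = 1
--     for x in times:
--         L = L * x // gcd(L, x)
--     S = sum(L // x for x in times)
--     lo = -((-n * L) // S)                      # ceil(n*L/S): least possible answer
--     c = sum(lo // x for x in times)            # people served by time lo
--     if c >= n:
--         return lo
--     hi = -((-(n + len(times)) * L) // S)       # ceil((n+k)*L/S): always feasible
--     events = []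
--     for x in times:
--         for m in range(lo // x + 1, hi // x + 1):
--             events.append(m * x)
--     events.sort()
--     return events[n - c - 1]
-- ===== Notes on version B (the rewrite author's own statement) =====
-- stated objective: alternative
-- what changed: A's binary search over answer values (recompute sum(mid//t) per probe) is replaced by a search-free method: with L a common multiple of the times and S = sum(L//x), served(t) is bracketed by t*S/L - k < served(t) <= t*S/L, so the answer lies in the narrow window (ceil(n*L/S), ceil((n+k)*L/S)]; the few completion events there are enumerated, sorted and the (n - served(lo))-th one is returned.
-- outside the precondition, e.g. on solution(5, []): A raises ValueError, B raises ZeroDivisionError; on solution(2, [0, 3]): A raises ZeroDivisionError, B raises ZeroDivisionError; on solution(1, [2, -1]): A returns 0, B returns -2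
import Mathlib
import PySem

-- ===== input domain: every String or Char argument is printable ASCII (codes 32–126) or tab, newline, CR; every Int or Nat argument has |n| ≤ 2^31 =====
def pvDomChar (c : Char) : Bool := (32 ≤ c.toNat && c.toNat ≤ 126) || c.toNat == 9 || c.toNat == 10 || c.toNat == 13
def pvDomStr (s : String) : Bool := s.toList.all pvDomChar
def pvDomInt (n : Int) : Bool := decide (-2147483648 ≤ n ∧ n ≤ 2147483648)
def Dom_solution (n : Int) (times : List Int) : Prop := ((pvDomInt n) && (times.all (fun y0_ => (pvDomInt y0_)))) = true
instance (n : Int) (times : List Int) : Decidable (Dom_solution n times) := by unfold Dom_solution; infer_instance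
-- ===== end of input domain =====

-- B replaces A's binary search by a search-free computation: a harmonic bracket from a
-- common multiple of the service times pins the answer into a narrow window, whose few
-- completion events are enumerated, sorted and indexed (objective: alternative).


-- ===== PORT A =====
-- A's while loop: state (left, right, answer); people is recomputed from scratch each round.
-- fuel is only a totality guard: the wrapper passes (m * n).toNat ≥ right + 1 - left, which
-- the loop body never exhausts (each round shrinks right + 1 - left by at least 1).
def solLoopA (n : Int) (times : List Int) (fuel : Nat) (left right answer : Int) : Int :=
  match fuel with
  | 0 => answer
  | fuel + 1 =>
    if left ≤ right then
      let mid := PySem.Int.floordiv (left + right) 2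
      let people := times.foldl (fun acc time => acc + PySem.Int.floordiv mid time) 0
      if people ≥ n then
        solLoopA n times fuel left (mid - 1) mid
      else
        solLoopA n times fuel (mid + 1) right answer
    else answer

def solution (n : Int) (times : List Int) : Int :=
  match PySem.List.max? times (fun x => x) with
  | none => 0   -- max(times) raises ValueError on empty times; excluded by Pre_solution
  | some m => solLoopA n times (m * n).toNat 1 (m * n) 0

-- ===== PORT B =====
-- Source B computes the answer without any search: a common multiple L of the service
-- times gives the bracket served(t)*L <= t*S < (served(t)+k)*L (S = sum of L//x), the
-- answer is located in the window (lo, hi] around the harmonic estimate n*L/S, and the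
-- few completion events inside the window are enumerated, sorted and indexed.

-- inner 'while b:' of Source B's gcd; fuel b.natAbs + 1 is only a totality guard
-- (|a % b| < |b| each round, so the loop never exhausts it)
def pyGcdLoop (fuel : Nat) (a b : Int) : Int :=
  match fuel with
  | 0 => a
  | fuel + 1 => if b ≠ 0 then pyGcdLoop fuel b (PySem.Int.mod a b) else a

def pyGcd (a b : Int) : Int := pyGcdLoop (b.natAbs + 1) a b

def solution_alt (n : Int) (times : List Int) : Int :=
  if n ≤ 0 then 0
  else
    let L := times.foldl (fun L x => PySem.Int.floordiv (L * x) (pyGcd L x)) 1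
    let S := (times.map (fun x => PySem.Int.floordiv L x)).sum
    let lo := -(PySem.Int.floordiv (-(n * L)) S)   -- ceil(n*L/S)
    let c := (times.map (fun x => PySem.Int.floordiv lo x)).sum
    if n ≤ c then lo
    else
      let hi := -(PySem.Int.floordiv (-((n + (times.length : Int)) * L)) S)
      let events := times.foldl
        (fun acc x => acc ++ (PySem.List.pyRange (PySem.Int.floordiv lo x + 1)
          (PySem.Int.floordiv hi x + 1)).map (fun m => m * x)) []
      let s := PySem.List.sorted events (fun e => e) false
      (PySem.List.pyGet? s (n - c - 1)).getD 0   -- index proved in range inside Pre_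

-- ===== PRECONDITION & SPEC =====
-- Pre_ excludes empty times (A's max(times) raises ValueError), all-nonpositive times
-- (if A's loop runs there its bisection over negative divisors returns an accidental
-- value, and a zero entry raises ZeroDivisionError), and, when n ≥ 1 people must actually
-- be served, times with a nonpositive entry: a zero entry makes A raise
-- ZeroDivisionError, and on negative entries (outside the natural domain of positive
-- service times) A's binary search runs over a non-monotone count and its returned value
-- is an accident of the bisection order.
def Pre_solution (n : Int) (times : List Int) : Prop :=
  times ≠ [] ∧ (∃ t ∈ times, 1 ≤ t) ∧ (n ≤ 0 ∨ ∀ t ∈ times, 1 ≤ t)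
instance (n : Int) (times : List Int) : Decidable (Pre_solution n times) := by
  unfold Pre_solution; infer_instance

def pvWitness_solution : Int × List Int := (3, [2, 3])

def Spec_solution (n : Int) (times : List Int) (out : Int) : Prop := out = solution_alt n times
instance (n : Int) (times : List Int) (out : Int) : Decidable (Spec_solution n times out) := by unfold Spec_solution; infer_instance

-- ===== CLAIM (what is proved, stated in full; the proofs are below) =====
def Claim_equal_solution : Prop := ∀ (n : Int) (times : List Int), Dom_solution n times → Pre_solution n times → Spec_solution n times (solution n times)

-- ===== LEMMAS AND PROOFS =====

-- the number of people servable by time t (what A's inner pass computes)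
def peopleF (times : List Int) (t : Int) : Int :=
  (times.map (fun x => PySem.Int.floordiv t x)).sum

theorem foldl_peopleF (times : List Int) (mid a : Int) :
    times.foldl (fun acc time => acc + PySem.Int.floordiv mid time) a
      = a + peopleF times mid := by
  induction times generalizing a with
  | nil => simp [peopleF]
  | cons x xs ih =>
    simp only [List.foldl, peopleF, List.map, List.sum_cons]
    rw [ih]
    simp only [peopleF]
    ring

theorem peopleF_mono (times : List Int) (hpos : ∀ t ∈ times, 1 ≤ t)
    {a b : Int} (hab : a ≤ b) : peopleF times a ≤ peopleF times b := by
  induction times with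
  | nil => simp [peopleF]
  | cons x xs ih =>
    have hx : 1 ≤ x := hpos x (by simp)
    have h1 : PySem.Int.floordiv a x ≤ PySem.Int.floordiv b x := by
      rw [PySem.Int.floordiv_eq_ediv_of_pos (by omega), PySem.Int.floordiv_eq_ediv_of_pos (by omega)]
      exact Int.ediv_le_ediv (by omega) hab
    have h2 := ih (fun t ht => hpos t (by simp [ht]))
    simp only [peopleF, List.map, List.sum_cons] at *
    omega

theorem peopleF_top (times : List Int) (hpos : ∀ t ∈ times, 1 ≤ t)
    {m n : Int} (hm : m ∈ times) (hn : 0 ≤ n) (hmax : ∀ y ∈ times, y ≤ m) :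
    n ≤ peopleF times (m * n) := by
  induction times with
  | nil => simp at hm
  | cons x xs ih =>
    have hx : 1 ≤ x := hpos x (by simp)
    have hm1 : 1 ≤ m := le_trans hx (hmax x (by simp))
    have hmn0 : 0 ≤ m * n := mul_nonneg (by omega) hn
    rcases List.mem_cons.mp hm with h | h
    · subst h
      have hfd : PySem.Int.floordiv (m * n) m = n := by
        rw [PySem.Int.floordiv_eq_ediv_of_pos (by omega)]
        exact Int.mul_ediv_cancel_left n (by omega)
      have hsum_nonneg : 0 ≤ (xs.map (fun x => PySem.Int.floordiv (m * n) x)).sum := by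
        apply List.sum_nonneg; intro z hz
        obtain ⟨y, hy, rfl⟩ := List.mem_map.mp hz
        have hy1 : 1 ≤ y := hpos y (by simp [hy])
        rw [PySem.Int.floordiv_eq_ediv_of_pos (by omega)]
        exact Int.ediv_nonneg hmn0 (by omega)
      simp only [peopleF, List.map, List.sum_cons, hfd]
      omega
    · have hterm : 0 ≤ PySem.Int.floordiv (m * n) x := by
        rw [PySem.Int.floordiv_eq_ediv_of_pos (by omega)]
        exact Int.ediv_nonneg hmn0 (by omega)
      have := ih (fun t ht => hpos t (by simp [ht])) h (fun y hy => hmax y (by simp [hy]))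
      simp only [peopleF, List.map, List.sum_cons] at *
      omega

-- A's loop returns answer whenever the guard already fails (any fuel)
theorem solLoopA_stop (n : Int) (times : List Int) (fuel : Nat) {left right : Int} (answer : Int)
    (h : ¬ left ≤ right) : solLoopA n times fuel left right answer = answer := by
  cases fuel with
  | zero => rfl
  | succ k => simp [solLoopA, h]

theorem solLoopA_succ (n : Int) (times : List Int) (k : Nat) {left right : Int} (answer : Int)
    (hlr : left ≤ right) :
    solLoopA n times (k + 1) left right answer =
      (if n ≤ peopleF times (PySem.Int.floordiv (left + right) 2) then
        solLoopA n times k left (PySem.Int.floordiv (left + right) 2 - 1)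
          (PySem.Int.floordiv (left + right) 2)
       else solLoopA n times k (PySem.Int.floordiv (left + right) 2 + 1) right answer) := by
  simp only [solLoopA, if_pos hlr, foldl_peopleF, zero_add, ge_iff_le]

-- spec of A's loop for a monotone feasibility count
theorem solLoopA_spec (n : Int) (times : List Int) (hpos : ∀ t ∈ times, 1 ≤ t) :
    ∀ (k : Nat) (left right answer : Int), (right + 1 - left).toNat ≤ k →
    ((∃ t, left ≤ t ∧ t ≤ right ∧ n ≤ peopleF times t) →
      (left ≤ solLoopA n times k left right answer ∧
       solLoopA n times k left right answer ≤ right ∧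
       n ≤ peopleF times (solLoopA n times k left right answer) ∧
       ∀ t, left ≤ t → t < solLoopA n times k left right answer → ¬ n ≤ peopleF times t)) ∧
    ((¬ ∃ t, left ≤ t ∧ t ≤ right ∧ n ≤ peopleF times t) →
      solLoopA n times k left right answer = answer) := by
  intro k
  induction k with
  | zero =>
    intro left right answer hk
    have hlr : ¬ left ≤ right := by omega
    rw [solLoopA_stop n times 0 answer hlr]
    constructor
    · rintro ⟨t, h1, h2, _⟩; omega
    · intro _; rfl
  | succ k ih =>
    intro left right answer hk
    by_cases hlr : left ≤ right
    · have hmid := PySem.Int.floordiv_two_mid_bounds hlr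
      rw [solLoopA_succ n times k answer hlr]
      set mid := PySem.Int.floordiv (left + right) 2 with hmiddef
      by_cases hp : n ≤ peopleF times mid
      · rw [if_pos hp]
        obtain ⟨ihA, ihB⟩ := ih left (mid - 1) mid (by omega)
        by_cases hex : ∃ t, left ≤ t ∧ t ≤ mid - 1 ∧ n ≤ peopleF times t
        · obtain ⟨a1, a2, a3, a4⟩ := ihA hex
          constructor
          · intro _; exact ⟨a1, by omega, a3, a4⟩
          · intro hnex; exact absurd ⟨mid, hmid.1, hmid.2, hp⟩ hnex
        · have hr := ihB hex
          rw [hr]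
          constructor
          · intro _
            refine ⟨hmid.1, hmid.2, hp, fun t h1 h2 hPt => ?_⟩
            exact hex ⟨t, h1, by omega, hPt⟩
          · intro hnex; exact absurd ⟨mid, hmid.1, hmid.2, hp⟩ hnex
      · rw [if_neg hp]
        obtain ⟨ihA, ihB⟩ := ih (mid + 1) right answer (by omega)
        have hbelow : ∀ t, t ≤ mid → ¬ n ≤ peopleF times t := by
          intro t ht hPt
          exact hp (le_trans hPt (peopleF_mono times hpos ht))
        constructor
        · rintro ⟨t, h1, h2, h3⟩
          have ht' : mid + 1 ≤ t := by
            by_contra hc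
            exact hbelow t (by omega) h3
          obtain ⟨a1, a2, a3, a4⟩ := ihA ⟨t, ht', h2, h3⟩
          refine ⟨by omega, a2, a3, fun s hs1 hs2 => ?_⟩
          by_cases hsm : s ≤ mid
          · exact hbelow s hsm
          · exact a4 s (by omega) hs2
        · intro hnex
          apply ihB
          rintro ⟨t, h1, h2, h3⟩
          exact hnex ⟨t, by omega, h2, h3⟩
    · rw [solLoopA_stop n times (k + 1) answer hlr]
      constructor
      · rintro ⟨t, h1, h2, _⟩; omega
      · intro _; rfl

-- ---- B-side lemmas ----

-- Euclid's loop on nonnegative arguments returns a positive common divisor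
theorem pyGcdLoop_spec : ∀ (fuel : Nat) (a b : Int), 1 ≤ a → 0 ≤ b → b.natAbs < fuel →
    pyGcdLoop fuel a b ∣ a ∧ pyGcdLoop fuel a b ∣ b ∧ 1 ≤ pyGcdLoop fuel a b := by
  intro fuel
  induction fuel with
  | zero => intro a b ha hb h; omega
  | succ f ih =>
    intro a b ha hb h
    by_cases hbz : b = 0
    · subst hbz
      simp only [pyGcdLoop, ne_eq, not_true_eq_false, if_neg, not_false_eq_true]
      exact ⟨dvd_rfl, dvd_zero a, ha⟩
    · have hb1 : 1 ≤ b := by omega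
      have hm0 : 0 ≤ PySem.Int.mod a b := PySem.Int.mod_nonneg a (by omega)
      have hmlt : PySem.Int.mod a b < b := PySem.Int.mod_lt a (by omega)
      obtain ⟨d1, d2, d3⟩ := ih b (PySem.Int.mod a b) hb1 hm0 (by omega)
      rw [pyGcdLoop, if_pos hbz]
      refine ⟨?_, d1, d3⟩
      have hsum : pyGcdLoop f b (PySem.Int.mod a b) ∣
          PySem.Int.floordiv a b * b + PySem.Int.mod a b :=
        dvd_add (Dvd.dvd.mul_left d1 _) d2
      rwa [PySem.Int.floordiv_mul_add_mod a b] at hsum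

theorem pyGcd_spec (a b : Int) (ha : 1 ≤ a) (hb : 0 ≤ b) :
    pyGcd a b ∣ a ∧ pyGcd a b ∣ b ∧ 1 ≤ pyGcd a b :=
  pyGcdLoop_spec (b.natAbs + 1) a b ha hb (by omega)

-- one fold step of Source B's running common multiple
theorem foldStep {L0 x g : Int} (hL0 : 1 ≤ L0) (hx : 1 ≤ x) (hg1 : g ∣ L0) (hg2 : g ∣ x)
    (hg3 : 1 ≤ g) :
    1 ≤ PySem.Int.floordiv (L0 * x) g ∧ L0 ∣ PySem.Int.floordiv (L0 * x) g ∧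
      x ∣ PySem.Int.floordiv (L0 * x) g := by
  obtain ⟨u, hu⟩ := hg1
  obtain ⟨w, hw⟩ := hg2
  subst hu
  subst hw
  have hgne : g ≠ 0 := by omega
  have hF : PySem.Int.floordiv (g * u * (g * w)) g = u * (g * w) := by
    rw [PySem.Int.floordiv_eq_ediv_of_pos (show (0:Int) < g by omega)]
    rw [show g * u * (g * w) = g * (u * (g * w)) by ring]
    exact Int.mul_ediv_cancel_left _ hgne
  have hu1 : 1 ≤ u := by nlinarith
  have hw1 : 1 ≤ w := by nlinarith
  refine ⟨?_, ?_, ?_⟩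
  · rw [hF]; nlinarith
  · rw [hF]; exact Dvd.intro w (by ring)
  · rw [hF]; exact Dvd.intro u (by ring)

-- the folded L is a positive common multiple of all service times
theorem L_spec (times : List Int) (hpos : ∀ t ∈ times, 1 ≤ t) :
    ∀ (L0 : Int), 1 ≤ L0 →
      1 ≤ times.foldl (fun L x => PySem.Int.floordiv (L * x) (pyGcd L x)) L0 ∧
      ∀ x ∈ times, x ∣ times.foldl (fun L x => PySem.Int.floordiv (L * x) (pyGcd L x)) L0 := by
  have main : ∀ (ts : List Int), (∀ t ∈ ts, 1 ≤ t) → ∀ (L0 : Int), 1 ≤ L0 →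
      1 ≤ ts.foldl (fun L x => PySem.Int.floordiv (L * x) (pyGcd L x)) L0 ∧
      L0 ∣ ts.foldl (fun L x => PySem.Int.floordiv (L * x) (pyGcd L x)) L0 ∧
      ∀ x ∈ ts, x ∣ ts.foldl (fun L x => PySem.Int.floordiv (L * x) (pyGcd L x)) L0 := by
    intro ts
    induction ts with
    | nil => intro _ L0 hL0; exact ⟨hL0, dvd_rfl, by simp⟩
    | cons x xs ih =>
      intro hp L0 hL0
      have hx : 1 ≤ x := hp x (by simp)
      obtain ⟨g1, g2, g3⟩ := pyGcd_spec L0 x hL0 (by omega)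
      obtain ⟨f1, f2, f3⟩ := foldStep hL0 hx g1 g2 g3
      obtain ⟨i1, i2, i3⟩ := ih (fun t ht => hp t (by simp [ht])) _ f1
      refine ⟨?_, ?_, ?_⟩
      · simpa [List.foldl] using i1
      · simpa [List.foldl] using dvd_trans f2 i2
      · intro y hy
        rcases List.mem_cons.mp hy with rfl | hy
        · simpa [List.foldl] using dvd_trans f3 i2
        · simpa [List.foldl] using i3 y hy
  intro L0 hL0
  obtain ⟨h1, _, h3⟩ := main times hpos L0 hL0
  exact ⟨h1, h3⟩

-- exact-division fact for a positive common multiple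
theorem ediv_pos_of_dvd {x L : Int} (hx : 1 ≤ x) (hL : 1 ≤ L) (h : x ∣ L) : 1 ≤ L / x := by
  obtain ⟨u, hu⟩ := h
  have hxne : x ≠ 0 := by omega
  rw [hu, Int.mul_ediv_cancel_left _ hxne]
  nlinarith

-- the two-sided bracket: served(t)*L ≤ t*S  and  t*S + k ≤ (served(t)+k)*L
theorem count_bracket (times : List Int) (hpos : ∀ t ∈ times, 1 ≤ t) (L : Int)
    (hL : 1 ≤ L) (hdvd : ∀ x ∈ times, x ∣ L) (t : Int) :
    peopleF times t * L ≤ t * (times.map (fun x => PySem.Int.floordiv L x)).sum ∧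
    t * (times.map (fun x => PySem.Int.floordiv L x)).sum + times.length ≤
      (peopleF times t + times.length) * L := by
  induction times with
  | nil => simp [peopleF]
  | cons x xs ih =>
    have hx : 1 ≤ x := hpos x (by simp)
    have hx0 : (0:Int) < x := by omega
    have hxd : x ∣ L := hdvd x (by simp)
    obtain ⟨ih1, ih2⟩ := ih (fun t ht => hpos t (by simp [ht])) (fun y hy => hdvd y (by simp [hy]))
    simp only [peopleF, List.map_cons, List.sum_cons, List.length_cons]
    simp only [peopleF] at ih1 ih2
    rw [show PySem.Int.floordiv t x = t / x from PySem.Int.floordiv_eq_ediv_of_pos hx0,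
      show PySem.Int.floordiv L x = L / x from PySem.Int.floordiv_eq_ediv_of_pos hx0]
    have hq1 : t / x * x ≤ t := Int.ediv_mul_le t (by omega)
    have hq2 : t < (t / x + 1) * x := Int.lt_ediv_add_one_mul_self t (by omega)
    have hLx1 : 1 ≤ L / x := ediv_pos_of_dvd hx hL hxd
    have hxLx : x * (L / x) = L := Int.mul_ediv_cancel' hxd
    have h1 : t / x * L ≤ t * (L / x) := by
      have hm := mul_le_mul_of_nonneg_right hq1 (show (0:Int) ≤ L / x by omega)
      calc t / x * L = t / x * (x * (L / x)) := by rw [hxLx]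
        _ = t / x * x * (L / x) := by ring
        _ ≤ t * (L / x) := hm
    have h2 : t * (L / x) + 1 ≤ (t / x + 1) * L := by
      have hm := mul_le_mul_of_nonneg_right (show t ≤ (t / x + 1) * x - 1 by omega)
        (show (0:Int) ≤ L / x by omega)
      calc t * (L / x) + 1 ≤ ((t / x + 1) * x - 1) * (L / x) + 1 := by linarith
        _ = (t / x + 1) * (x * (L / x)) - (L / x) + 1 := by ring
        _ = (t / x + 1) * L - (L / x) + 1 := by rw [hxLx]
        _ ≤ (t / x + 1) * L := by linarith
    constructor
    · nlinarith [ih1, h1]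
    · push_cast
      nlinarith [ih2, h2]

theorem S_pos (times : List Int) (hpos : ∀ t ∈ times, 1 ≤ t) (L : Int)
    (hL : 1 ≤ L) (hdvd : ∀ x ∈ times, x ∣ L) (hne : times ≠ []) :
    1 ≤ (times.map (fun x => PySem.Int.floordiv L x)).sum := by
  cases times with
  | nil => exact absurd rfl hne
  | cons x xs =>
    have hx : 1 ≤ x := hpos x (by simp)
    have hxd : x ∣ L := hdvd x (by simp)
    have h1 : 1 ≤ PySem.Int.floordiv L x := by
      rw [PySem.Int.floordiv_eq_ediv_of_pos (by omega)]
      exact ediv_pos_of_dvd hx hL hxd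
    have h2 : 0 ≤ (xs.map (fun x => PySem.Int.floordiv L x)).sum := by
      apply List.sum_nonneg
      intro z hz
      obtain ⟨y, hy, rfl⟩ := List.mem_map.mp hz
      have hy1 : 1 ≤ y := hpos y (by simp [hy])
      have hyd : y ∣ L := hdvd y (by simp [hy])
      rw [PySem.Int.floordiv_eq_ediv_of_pos (by omega)]
      have := ediv_pos_of_dvd hy1 hL hyd
      omega
    simp only [List.map_cons, List.sum_cons]
    omega

-- one block of events: the multiples of x in (lo, hi]
def evx (lo hi x : Int) : List Int :=
  (List.range (hi / x - lo / x).toNat).map (fun (j : Nat) => (lo / x + 1 + (j : Int)) * x)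

theorem events_eq (times : List Int) (hpos : ∀ t ∈ times, 1 ≤ t) (lo hi : Int) :
    times.foldl (fun acc x => acc ++ (PySem.List.pyRange (PySem.Int.floordiv lo x + 1)
        (PySem.Int.floordiv hi x + 1)).map (fun m => m * x)) []
      = times.flatMap (evx lo hi) := by
  rw [PySem.List.foldl_append_eq_flatMap, List.nil_append]
  induction times with
  | nil => rfl
  | cons x xs ih =>
    rw [List.flatMap_cons, List.flatMap_cons, ih (fun t ht => hpos t (by simp [ht]))]
    congr 1
    have hx : 1 ≤ x := hpos x (by simp)
    rw [show PySem.Int.floordiv lo x = lo / x from PySem.Int.floordiv_eq_ediv_of_pos (by omega),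
      show PySem.Int.floordiv hi x = hi / x from PySem.Int.floordiv_eq_ediv_of_pos (by omega),
      PySem.List.pyRange_one, List.map_map]
    unfold evx
    have harg : (hi / x + 1 - (lo / x + 1)).toNat = (hi / x - lo / x).toNat := by omega
    rw [harg]
    apply List.map_congr_left
    intro j _
    simp only [Function.comp]

-- every event lies in (lo, hi]
theorem evx_mem_bounds {lo hi x e : Int} (hx : 1 ≤ x) (he : e ∈ evx lo hi x) :
    lo < e ∧ e ≤ hi := by
  obtain ⟨j, hj, rfl⟩ := List.mem_map.mp he
  have hjK : (j : Int) < hi / x - lo / x := by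
    have := List.mem_range.mp hj
    omega
  have hj0 : (0 : Int) ≤ (j : Int) := by positivity
  constructor
  · have h1 : lo < (lo / x + 1) * x := Int.lt_ediv_add_one_mul_self lo (by omega)
    nlinarith
  · have h2 : hi / x * x ≤ hi := Int.ediv_mul_le hi (by omega)
    have h3 : lo / x + 1 + (j : Int) ≤ hi / x := by omega
    nlinarith

-- counting the range entries below a threshold
theorem countP_range_lt (A : Int) : ∀ (K : Nat),
    (List.range K).countP (fun (j : Nat) => decide ((j : Int) < A)) = min A.toNat K := by
  intro K
  induction K with
  | zero => simp
  | succ K ih =>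
    rw [List.range_succ, List.countP_append, ih, List.countP_singleton]
    by_cases h : (K : Int) < A
    · rw [if_pos (by simpa using h)]
      omega
    · rw [if_neg (by simpa using h)]
      omega

theorem evx_countP {lo hi x t : Int} (hx : 1 ≤ x) (hlt : lo ≤ t) (hth : t ≤ hi) :
    ((evx lo hi x).countP (fun e => decide (e ≤ t)) : Int) = t / x - lo / x := by
  unfold evx
  rw [List.countP_map]
  have hcong : List.countP ((fun e => decide (e ≤ t)) ∘ fun (j : Nat) => (lo / x + 1 + (j:Int)) * x)
      (List.range (hi / x - lo / x).toNat)
      = List.countP (fun (j : Nat) => decide ((j : Int) < t / x - lo / x))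
          (List.range (hi / x - lo / x).toNat) := by
    apply List.countP_congr
    intro j _
    simp only [Function.comp, decide_eq_true_eq]
    have hiff : (lo / x + 1 + (j:Int)) * x ≤ t ↔ lo / x + 1 + (j:Int) ≤ t / x :=
      (Int.le_ediv_iff_mul_le (show (0:Int) < x by omega)).symm
    rw [hiff]
    omega
  rw [hcong, countP_range_lt]
  have hmono1 : lo / x ≤ t / x := Int.ediv_le_ediv (by omega) hlt
  have hmono2 : t / x ≤ hi / x := Int.ediv_le_ediv (by omega) hth
  omega

-- served(t) = served(lo) + number of events ≤ t, for t in the window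
theorem count_window (times : List Int) (hpos : ∀ t ∈ times, 1 ≤ t) (lo hi t : Int)
    (hlt : lo ≤ t) (hth : t ≤ hi) :
    peopleF times t = peopleF times lo +
      ((times.flatMap (evx lo hi)).countP (fun e => decide (e ≤ t)) : Int) := by
  induction times with
  | nil => simp [peopleF]
  | cons x xs ih =>
    have hx : 1 ≤ x := hpos x (by simp)
    have ihx := ih (fun t ht => hpos t (by simp [ht]))
    have hx0 : (0:Int) < x := by omega
    simp only [peopleF, List.map_cons, List.sum_cons, List.flatMap_cons,
      List.countP_append]
    simp only [peopleF] at ihx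
    rw [show PySem.Int.floordiv t x = t / x from PySem.Int.floordiv_eq_ediv_of_pos hx0,
      show PySem.Int.floordiv lo x = lo / x from PySem.Int.floordiv_eq_ediv_of_pos hx0]
    have hhead := evx_countP hx hlt hth
    push_cast
    linarith [ihx, hhead]

-- selection in a list that is monotone by index: the first i+1 entries witness the
-- count, and a value below entry i bounds it
theorem countP_ge_of_mono (s : List Int) (v : Int) (i : Nat) (hi : i < s.length)
    (hbound : ∀ (j : Nat) (hj : j < s.length), j ≤ i → s[j] ≤ v) :
    i + 1 ≤ List.countP (fun e => decide (e ≤ v)) s := by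
  have htake : List.countP (fun e => decide (e ≤ v)) (s.take (i + 1))
      = (s.take (i + 1)).length := by
    rw [List.countP_eq_length]
    intro e he
    obtain ⟨j, hj, rfl⟩ := List.mem_iff_getElem.mp he
    have hjlen : j < s.length := by
      have := List.length_take (i := i + 1) (l := s)
      omega
    have hji : j ≤ i := by
      have := List.length_take (i := i + 1) (l := s)
      omega
    rw [List.getElem_take]
    simpa using hbound j hjlen hji
  have hlt : (s.take (i + 1)).length = i + 1 := by
    rw [List.length_take]
    omega
  have hle := List.Sublist.countP_le (p := fun e => decide (e ≤ v)) (List.take_sublist (i + 1) s)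
  omega

theorem countP_le_of_mono (s : List Int) (v t : Int) (i : Nat) (hi : i < s.length)
    (ht : t < v) (hlow : ∀ (j : Nat) (hj : j < s.length), i ≤ j → v ≤ s[j]) :
    List.countP (fun e => decide (e ≤ t)) s ≤ i := by
  have hsplit : List.countP (fun e => decide (e ≤ t)) s
      = List.countP (fun e => decide (e ≤ t)) (s.take i)
        + List.countP (fun e => decide (e ≤ t)) (s.drop i) := by
    conv_lhs => rw [← List.take_append_drop i s]
    exact List.countP_append
  have hdrop : List.countP (fun e => decide (e ≤ t)) (s.drop i) = 0 := by
    rw [List.countP_eq_zero]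
    intro e he
    obtain ⟨j, hj, rfl⟩ := List.mem_iff_getElem.mp he
    rw [List.getElem_drop]
    simp only [decide_eq_true_eq, not_le]
    have hij : i + j < s.length := by
      have := List.length_drop (i := i) (l := s)
      omega
    have := hlow (i + j) hij (by omega)
    omega
  have htk : List.countP (fun e => decide (e ≤ t)) (s.take i) ≤ i := by
    have h1 := List.countP_le_length (p := fun e => decide (e ≤ t)) (l := s.take i)
    have := List.length_take (i := i) (l := s)
    omega
  omega

-- ===== VERDICT (by name: the statement is the Claim_ definition above) =====
theorem solution_spec : Claim_equal_solution := by
  intro n times _ hpre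
  obtain ⟨hne, ⟨t0, ht0, ht01⟩, hcases⟩ := hpre
  unfold Spec_solution
  cases hmx : PySem.List.max? times (fun x => x) with
  | none => exact absurd ((PySem.List.max?_eq_none_iff times (fun x => x)).mp hmx) hne
  | some m =>
    simp only [solution, hmx]
    have hmem : m ∈ times := PySem.List.max?_mem hmx
    have hmax : ∀ y ∈ times, y ≤ m := by
      have := PySem.List.max?_isMax hmx
      simpa using this
    have hm1 : 1 ≤ m := le_trans ht01 (hmax t0 ht0)
    by_cases hn : n ≤ 0
    · have hmn : m * n ≤ 0 := mul_nonpos_iff.mpr (Or.inl ⟨by omega, hn⟩)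
      rw [solLoopA_stop n times (m * n).toNat 0 (by omega)]
      simp [solution_alt, hn]
    · have hpos : ∀ t ∈ times, 1 ≤ t := hcases.resolve_left hn
      have hn1 : 1 ≤ n := by omega
      -- A-side: the returned value is the least feasible time
      have htop : n ≤ peopleF times (m * n) := peopleF_top times hpos hmem (by omega) hmax
      have hmn1 : 1 ≤ m * n := by nlinarith
      obtain ⟨a1, a2, a3, a4⟩ := (solLoopA_spec n times hpos (m * n).toNat 1 (m * n) 0 (by omega)).1
        ⟨m * n, by omega, le_refl _, htop⟩
      set a := solLoopA n times (m * n).toNat 1 (m * n) 0 with ha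
      -- B-side
      simp only [solution_alt, if_neg hn]
      set L := times.foldl (fun L x => PySem.Int.floordiv (L * x) (pyGcd L x)) 1 with hL
      set S := (times.map (fun x => PySem.Int.floordiv L x)).sum with hS
      set lo := -(PySem.Int.floordiv (-(n * L)) S) with hlo
      set c := (times.map (fun x => PySem.Int.floordiv lo x)).sum with hc
      set k := ((times.length : Nat) : Int) with hk
      set hi := -(PySem.Int.floordiv (-((n + k) * L)) S) with hhi
      obtain ⟨hLpos, hLdvd⟩ := L_spec times hpos 1 (by norm_num)
      rw [← hL] at hLpos hLdvd
      have hSpos : 1 ≤ S := by rw [hS]; exact S_pos times hpos L hLpos hLdvd hne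
      have hk1 : 1 ≤ k := by
        have := List.length_pos_of_ne_nil hne
        omega
      have hloBr : (lo - 1) * S < n * L ∧ n * L ≤ lo * S :=
        (PySem.Int.neg_floordiv_neg_eq_iff_of_pos (show (0:Int) < S by omega)).mp hlo.symm
      have hhiBr : (hi - 1) * S < (n + k) * L ∧ (n + k) * L ≤ hi * S :=
        (PySem.Int.neg_floordiv_neg_eq_iff_of_pos (show (0:Int) < S by omega)).mp hhi.symm
      have hc_eq : peopleF times lo = c := hc.symm
      have hbrA := count_bracket times hpos L hLpos hLdvd a
      rw [← hS] at hbrA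
      have hbrHi := count_bracket times hpos L hLpos hLdvd hi
      rw [← hS] at hbrHi
      have haS : n * L ≤ a * S := by
        have h1 : n * L ≤ peopleF times a * L :=
          mul_le_mul_of_nonneg_right a3 (by omega)
        linarith [hbrA.1]
      have hloa : lo ≤ a := by
        have h1 : (lo - 1) * S < a * S := by linarith [hloBr.1]
        have := lt_of_mul_lt_mul_right h1 (show (0:Int) ≤ S by omega)
        omega
      have hlo1 : 1 ≤ lo := by
        by_contra hcl
        push_neg at hcl
        have h2 : lo * S ≤ 0 := mul_nonpos_iff.mpr (Or.inr ⟨by omega, by omega⟩)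
        nlinarith [hloBr.2]
      by_cases hcge : n ≤ c
      · rw [if_pos hcge]
        have hfeas : n ≤ peopleF times lo := by omega
        have : a ≤ lo := by
          by_contra hcl
          push_neg at hcl
          exact a4 lo hlo1 hcl hfeas
        omega
      · rw [if_neg hcge]
        push_neg at hcge
        have hlohi : lo ≤ hi := by
          by_contra hcl
          push_neg at hcl
          have h1 : hi * S ≤ (lo - 1) * S :=
            mul_le_mul_of_nonneg_right (by omega) (by omega)
          nlinarith [hloBr.1, hhiBr.2, hk1, hLpos]
        have hcnt_hi : n < peopleF times hi := by
          have hmul : (n + k) * L < (peopleF times hi + k) * L := by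
            linarith [hhiBr.2, hbrHi.2, hk1]
          have := lt_of_mul_lt_mul_right hmul (show (0:Int) ≤ L by omega)
          omega
        set events := times.foldl
          (fun acc x => acc ++ (PySem.List.pyRange (PySem.Int.floordiv lo x + 1)
            (PySem.Int.floordiv hi x + 1)).map (fun m => m * x)) []
          with hev
        set s := PySem.List.sorted events (fun e => e) false with hsrt
        have hev_eq : events = times.flatMap (evx lo hi) := by
          rw [hev]
          exact events_eq times hpos lo hi
        have hperm : s.Perm events := by
          rw [hsrt]
          exact PySem.List.sorted_perm events (fun e => e) false
        have hmono : ∀ (p q : Nat) (hpq : p ≤ q) (hq : q < s.length), s[p] ≤ s[q] := by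
          intro p q hpq hq
          exact PySem.List.sorted_id_getElem_mono events hpq hq
        have hcw : ∀ t, lo ≤ t → t ≤ hi →
            peopleF times t = c + (s.countP (fun e => decide (e ≤ t)) : Int) := by
          intro t h1 h2
          have hw := count_window times hpos lo hi t h1 h2
          rw [← hev_eq, hc_eq, ← List.Perm.countP_eq _ hperm] at hw
          exact hw
        have hallhi : ∀ e ∈ s, e ≤ hi := by
          intro e he
          have hee : e ∈ events := hperm.mem_iff.mp he
          rw [hev_eq] at hee
          obtain ⟨x, hx, hex⟩ := List.mem_flatMap.mp hee
          exact (evx_mem_bounds (hpos x hx) hex).2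
        have hlen : (s.length : Int) = peopleF times hi - c := by
          have h1 := hcw hi hlohi le_rfl
          have h2 : s.countP (fun e => decide (e ≤ hi)) = s.length := by
            rw [List.countP_eq_length]
            intro e he
            simpa using hallhi e he
          omega
        have htoNat : (((n - c - 1).toNat : Nat) : Int) = n - c - 1 :=
          Int.toNat_of_nonneg (by omega)
        have hilen : (n - c - 1).toNat < s.length := by omega
        have hval : (PySem.List.pyGet? s (n - c - 1)).getD 0 = s[(n - c - 1).toNat] := by
          calc (PySem.List.pyGet? s (n - c - 1)).getD 0
              = PySem.List.pyGetD s (n - c - 1) 0 := rfl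
            _ = s.getD (n - c - 1).toNat 0 := PySem.List.pyGetD_of_nonneg s 0 (by omega)
            _ = s[(n - c - 1).toNat] := List.getD_eq_getElem s 0 hilen
        rw [hval]
        have hmemi : s[(n - c - 1).toNat] ∈ events :=
          hperm.mem_iff.mp (s.getElem_mem hilen)
        have hwin : lo < s[(n - c - 1).toNat] ∧ s[(n - c - 1).toNat] ≤ hi := by
          rw [hev_eq] at hmemi
          obtain ⟨x, hx, hex⟩ := List.mem_flatMap.mp hmemi
          exact evx_mem_bounds (hpos x hx) hex
        have hfeas : n ≤ peopleF times s[(n - c - 1).toNat] := by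
          have h1 := hcw s[(n - c - 1).toNat] (by omega) hwin.2
          have h2 : (n - c - 1).toNat + 1 ≤ s.countP (fun e => decide (e ≤ s[(n - c - 1).toNat])) :=
            countP_ge_of_mono s s[(n - c - 1).toNat] (n - c - 1).toNat hilen
              (fun j hj hji => hmono j (n - c - 1).toNat hji hilen)
          omega
        have hle1 : a ≤ s[(n - c - 1).toNat] := by
          by_contra hcl
          push_neg at hcl
          exact a4 s[(n - c - 1).toNat] (by omega) hcl hfeas
        have hle2 : s[(n - c - 1).toNat] ≤ a := by
          by_contra hcl
          push_neg at hcl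
          have hahi : a ≤ hi := by omega
          have h1 := hcw a hloa hahi
          have h2 : s.countP (fun e => decide (e ≤ a)) ≤ (n - c - 1).toNat :=
            countP_le_of_mono s s[(n - c - 1).toNat] a (n - c - 1).toNat hilen hcl
              (fun j hj hij => hmono (n - c - 1).toNat j hij hj)
          omega
        omega
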